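-- pv_equiv track=rewrite | github.com/zxb319/pythonprj | tools/lunar_calendar.py | lunar_date
-- ===== SOURCE A (Python) =====
-- _lunar_months_day_count = [
--     0x4ae0, 0xa570, 0x5268, 0xd260, 0xd950, 0x6aa8, 0x56a0, 0x9ad0, 0x4ae8, 0x4ae0,  # 1910
--     0xa4d8, 0xa4d0, 0xd250, 0xd548, 0xb550, 0x56a0, 0x96d0, 0x95b0, 0x49b8, 0x49b0,  # 1920
--     0xa4b0, 0xb258, 0x6a50, 0x6d40, 0xada8, 0x2b60, 0x9570, 0x4978, 0x4970, 0x64b0,  # 1930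
--     0xd4a0, 0xea50, 0x6d48, 0x5ad0, 0x2b60, 0x9370, 0x92e0, 0xc968, 0xc950, 0xd4a0,  # 1940
--     0xda50, 0xb550, 0x56a0, 0xaad8, 0x25d0, 0x92d0, 0xc958, 0xa950, 0xb4a8, 0x6ca0,  # 1950
--     0xb550, 0x55a8, 0x4da0, 0xa5b0, 0x52b8, 0x52b0, 0xa950, 0xe950, 0x6aa0, 0xad50,  # 1960
--     0xab50, 0x4b60, 0xa570, 0xa570, 0x5260, 0xe930, 0xd950, 0x5aa8, 0x56a0, 0x96d0,  # 1970
--     0x4ae8, 0x4ad0, 0xa4d0, 0xd268, 0xd250, 0xd528, 0xb540, 0xb6a0, 0x96d0, 0x95b0,  # 1980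
--     0x49b0, 0xa4b8, 0xa4b0, 0xb258, 0x6a50, 0x6d40, 0xada0, 0xab60, 0x9370, 0x4978,  # 1990
--     0x4970, 0x64b0, 0x6a50, 0xea50, 0x6b28, 0x5ac0, 0xab60, 0x9368, 0x92e0, 0xc960,  # 2000
--     0xd4a8, 0xd4a0, 0xda50, 0x5aa8, 0x56a0, 0xaad8, 0x25d0, 0x92d0, 0xc958, 0xa950,  # 2010
--     0xb4a0, 0xb550, 0xb550, 0x55a8, 0x4ba0, 0xa5b0, 0x52b8, 0x52b0, 0xa930, 0x74a8,  # 2020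
--     0x6aa0, 0xad50, 0x4da8, 0x4b60, 0x9570, 0xa4e0, 0xd260, 0xe930, 0xd530, 0x5aa0,  # 2030
--     0x6b50, 0x96d0, 0x4ae8, 0x4ad0, 0xa4d0, 0xd258, 0xd250, 0xd520, 0xdaa0, 0xb5a0,  # 2040
--     0x56d0, 0x4ad8, 0x49b0, 0xa4b8, 0xa4b0, 0xaa50, 0xb528, 0x6d20, 0xada0, 0x55b0,  # 2050
-- ]
--
-- _lunar_leap_month = [
--     0x00, 0x50, 0x04, 0x00, 0x20,  # 1910
--     0x60, 0x05, 0x00, 0x20, 0x70,  # 1920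
--     0x05, 0x00, 0x40, 0x02, 0x06,  # 1930
--     0x00, 0x50, 0x03, 0x07, 0x00,  # 1940
--     0x60, 0x04, 0x00, 0x20, 0x70,  # 1950
--     0x05, 0x00, 0x30, 0x80, 0x06,  # 1960
--     0x00, 0x40, 0x03, 0x07, 0x00,  # 1970
--     0x50, 0x04, 0x08, 0x00, 0x60,  # 1980
--     0x04, 0x0a, 0x00, 0x60, 0x05,  # 1990
--     0x00, 0x30, 0x80, 0x05, 0x00,  # 2000
--     0x40, 0x02, 0x07, 0x00, 0x50,  # 2010
--     0x04, 0x09, 0x00, 0x60, 0x04,  # 2020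
--     0x00, 0x20, 0x60, 0x05, 0x00,  # 2030
--     0x30, 0xb0, 0x06, 0x00, 0x50,  # 2040
--     0x02, 0x07, 0x00, 0x50, 0x03  # 2050
-- ]
--
-- def lunar_leap_month(year: int):
--     index = (year - 1901) // 2
--     pos = (year - 1901 + 1) % 2
--
--     a = _lunar_leap_month[index]
--     return a // 2 ** (pos * 4) % 2 ** 4
--
-- def lunar_months_day_count(year: int):
--     raw = _lunar_months_day_count[year - 1901]
--     cnt = 12
--     if lunar_leap_month(year):
--         cnt = 13
--     res = []
--     for i in range(1, cnt + 1):
--         cur = raw // 2 ** (16 - i) % 2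
--         if cur == 0:
--             res.append(29)
--         else:
--             res.append(30)
--
--     return res
--
-- def lunar_date(all_days: int):
--     rest_days = all_days - 49
--
--     lunar_year = 1901
--     lunar_year_days = sum(lunar_months_day_count(lunar_year))
--     while rest_days > lunar_year_days:
--         rest_days -= lunar_year_days
--         lunar_year += 1
--         lunar_year_days = sum(lunar_months_day_count(lunar_year))
--
--     lunar_month = 1
--     lunar_months_day = lunar_months_day_count(lunar_year)
--     while rest_days > lunar_months_day[lunar_month - 1]:
--         rest_days -= lunar_months_day[lunar_month - 1]
--         lunar_month += 1
--
--     lunar_day = rest_days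
--
--     this_year_leap_month = lunar_leap_month(lunar_year)
--
--     is_leap_month = False
--     if lunar_month > this_year_leap_month > 0:
--         lunar_month -= 1
--         if lunar_month == this_year_leap_month:
--             is_leap_month = True
--
--     return lunar_year, lunar_month, lunar_day, is_leap_month
-- ===== SOURCE B (Python) =====
-- from bisect import bisect_left
--
-- _lunar_months_day_count = [
--     0x4ae0, 0xa570, 0x5268, 0xd260, 0xd950, 0x6aa8, 0x56a0, 0x9ad0, 0x4ae8, 0x4ae0,  # 1910
--     0xa4d8, 0xa4d0, 0xd250, 0xd548, 0xb550, 0x56a0, 0x96d0, 0x95b0, 0x49b8, 0x49b0,  # 1920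
--     0xa4b0, 0xb258, 0x6a50, 0x6d40, 0xada8, 0x2b60, 0x9570, 0x4978, 0x4970, 0x64b0,  # 1930
--     0xd4a0, 0xea50, 0x6d48, 0x5ad0, 0x2b60, 0x9370, 0x92e0, 0xc968, 0xc950, 0xd4a0,  # 1940
--     0xda50, 0xb550, 0x56a0, 0xaad8, 0x25d0, 0x92d0, 0xc958, 0xa950, 0xb4a8, 0x6ca0,  # 1950
--     0xb550, 0x55a8, 0x4da0, 0xa5b0, 0x52b8, 0x52b0, 0xa950, 0xe950, 0x6aa0, 0xad50,  # 1960
--     0xab50, 0x4b60, 0xa570, 0xa570, 0x5260, 0xe930, 0xd950, 0x5aa8, 0x56a0, 0x96d0,  # 1970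
--     0x4ae8, 0x4ad0, 0xa4d0, 0xd268, 0xd250, 0xd528, 0xb540, 0xb6a0, 0x96d0, 0x95b0,  # 1980
--     0x49b0, 0xa4b8, 0xa4b0, 0xb258, 0x6a50, 0x6d40, 0xada0, 0xab60, 0x9370, 0x4978,  # 1990
--     0x4970, 0x64b0, 0x6a50, 0xea50, 0x6b28, 0x5ac0, 0xab60, 0x9368, 0x92e0, 0xc960,  # 2000
--     0xd4a8, 0xd4a0, 0xda50, 0x5aa8, 0x56a0, 0xaad8, 0x25d0, 0x92d0, 0xc958, 0xa950,  # 2010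
--     0xb4a0, 0xb550, 0xb550, 0x55a8, 0x4ba0, 0xa5b0, 0x52b8, 0x52b0, 0xa930, 0x74a8,  # 2020
--     0x6aa0, 0xad50, 0x4da8, 0x4b60, 0x9570, 0xa4e0, 0xd260, 0xe930, 0xd530, 0x5aa0,  # 2030
--     0x6b50, 0x96d0, 0x4ae8, 0x4ad0, 0xa4d0, 0xd258, 0xd250, 0xd520, 0xdaa0, 0xb5a0,  # 2040
--     0x56d0, 0x4ad8, 0x49b0, 0xa4b8, 0xa4b0, 0xaa50, 0xb528, 0x6d20, 0xada0, 0x55b0,  # 2050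
-- ]
--
-- _lunar_leap_month = [
--     0x00, 0x50, 0x04, 0x00, 0x20,  # 1910
--     0x60, 0x05, 0x00, 0x20, 0x70,  # 1920
--     0x05, 0x00, 0x40, 0x02, 0x06,  # 1930
--     0x00, 0x50, 0x03, 0x07, 0x00,  # 1940
--     0x60, 0x04, 0x00, 0x20, 0x70,  # 1950
--     0x05, 0x00, 0x30, 0x80, 0x06,  # 1960
--     0x00, 0x40, 0x03, 0x07, 0x00,  # 1970
--     0x50, 0x04, 0x08, 0x00, 0x60,  # 1980
--     0x04, 0x0a, 0x00, 0x60, 0x05,  # 1990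
--     0x00, 0x30, 0x80, 0x05, 0x00,  # 2000
--     0x40, 0x02, 0x07, 0x00, 0x50,  # 2010
--     0x04, 0x09, 0x00, 0x60, 0x04,  # 2020
--     0x00, 0x20, 0x60, 0x05, 0x00,  # 2030
--     0x30, 0xb0, 0x06, 0x00, 0x50,  # 2040
--     0x02, 0x07, 0x00, 0x50, 0x03  # 2050
-- ]
--
--
-- def _leap(year):
--     a = _lunar_leap_month[(year - 1901) // 2]
--     return (a >> (((year - 1901 + 1) % 2) * 4)) & 0xF
--
--
-- def _months(year):
--     raw = _lunar_months_day_count[year - 1901]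
--     cnt = 13 if _leap(year) else 12
--     return [29 + ((raw >> (16 - i)) & 1) for i in range(1, cnt + 1)]
--
--
-- def _cums(xs):
--     out = []
--     t = 0
--     for x in xs:
--         t += x
--         out.append(t)
--     return out
--
--
-- # Precomputed once: every year's month lengths and a prefix-sum array of yearly totals.
-- _MLISTS = [_months(y) for y in range(1901, 2051)]
-- _YCUMS = _cums([sum(ms) for ms in _MLISTS])
--
--
-- def lunar_date(all_days: int):
--     rest_days = all_days - 49
--
--     k = bisect_left(_YCUMS, rest_days)
--     lunar_year = 1901 + k
--     rem = rest_days - (_YCUMS[k - 1] if k > 0 else 0)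
--
--     ms = _MLISTS[k]
--     mcums = _cums(ms)
--     m = bisect_left(mcums, rem)
--     lunar_month = m + 1
--     lunar_day = rem - (mcums[m - 1] if m > 0 else 0)
--
--     this_year_leap_month = _leap(lunar_year)
--
--     is_leap_month = False
--     if lunar_month > this_year_leap_month > 0:
--         lunar_month -= 1
--         if lunar_month == this_year_leap_month:
--             is_leap_month = True
--
--     return lunar_year, lunar_month, lunar_day, is_leap_month
-- ===== Notes on version B (the rewrite author's own statement) =====
-- stated objective: alternative
-- what changed: Replaces the two subtract-and-advance while loops with tables precomputed once (per-year month lists and a prefix-sum array of yearly totals) plus two bisect_left lookups; per call the year is found by binary search instead of walking up to 150 years recomputing month lists.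
import Mathlib
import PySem

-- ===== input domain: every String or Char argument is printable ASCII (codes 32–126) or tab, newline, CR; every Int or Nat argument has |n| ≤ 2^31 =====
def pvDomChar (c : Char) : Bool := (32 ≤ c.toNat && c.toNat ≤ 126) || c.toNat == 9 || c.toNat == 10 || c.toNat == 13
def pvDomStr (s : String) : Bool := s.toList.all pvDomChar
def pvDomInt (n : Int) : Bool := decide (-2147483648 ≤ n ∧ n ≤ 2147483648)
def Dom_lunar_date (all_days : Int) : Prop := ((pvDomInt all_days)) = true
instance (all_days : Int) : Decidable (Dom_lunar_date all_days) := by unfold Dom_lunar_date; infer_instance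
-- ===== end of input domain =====

-- B replaces A's two subtract-and-advance while loops by tables precomputed once
-- (per-year month lists, prefix sums of yearly totals) and two bisect_left lookups;
-- same return value on every input on which A returns (Pre_ excludes exactly A's IndexError inputs).


-- ===== PORT A =====

def pvTable : List Int := [
  0x4ae0, 0xa570, 0x5268, 0xd260, 0xd950, 0x6aa8, 0x56a0, 0x9ad0, 0x4ae8, 0x4ae0,
  0xa4d8, 0xa4d0, 0xd250, 0xd548, 0xb550, 0x56a0, 0x96d0, 0x95b0, 0x49b8, 0x49b0,
  0xa4b0, 0xb258, 0x6a50, 0x6d40, 0xada8, 0x2b60, 0x9570, 0x4978, 0x4970, 0x64b0,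
  0xd4a0, 0xea50, 0x6d48, 0x5ad0, 0x2b60, 0x9370, 0x92e0, 0xc968, 0xc950, 0xd4a0,
  0xda50, 0xb550, 0x56a0, 0xaad8, 0x25d0, 0x92d0, 0xc958, 0xa950, 0xb4a8, 0x6ca0,
  0xb550, 0x55a8, 0x4da0, 0xa5b0, 0x52b8, 0x52b0, 0xa950, 0xe950, 0x6aa0, 0xad50,
  0xab50, 0x4b60, 0xa570, 0xa570, 0x5260, 0xe930, 0xd950, 0x5aa8, 0x56a0, 0x96d0,
  0x4ae8, 0x4ad0, 0xa4d0, 0xd268, 0xd250, 0xd528, 0xb540, 0xb6a0, 0x96d0, 0x95b0,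
  0x49b0, 0xa4b8, 0xa4b0, 0xb258, 0x6a50, 0x6d40, 0xada0, 0xab60, 0x9370, 0x4978,
  0x4970, 0x64b0, 0x6a50, 0xea50, 0x6b28, 0x5ac0, 0xab60, 0x9368, 0x92e0, 0xc960,
  0xd4a8, 0xd4a0, 0xda50, 0x5aa8, 0x56a0, 0xaad8, 0x25d0, 0x92d0, 0xc958, 0xa950,
  0xb4a0, 0xb550, 0xb550, 0x55a8, 0x4ba0, 0xa5b0, 0x52b8, 0x52b0, 0xa930, 0x74a8,
  0x6aa0, 0xad50, 0x4da8, 0x4b60, 0x9570, 0xa4e0, 0xd260, 0xe930, 0xd530, 0x5aa0,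
  0x6b50, 0x96d0, 0x4ae8, 0x4ad0, 0xa4d0, 0xd258, 0xd250, 0xd520, 0xdaa0, 0xb5a0,
  0x56d0, 0x4ad8, 0x49b0, 0xa4b8, 0xa4b0, 0xaa50, 0xb528, 0x6d20, 0xada0, 0x55b0]

def pvLeapTable : List Int := [
  0x00, 0x50, 0x04, 0x00, 0x20, 0x60, 0x05, 0x00, 0x20, 0x70,
  0x05, 0x00, 0x40, 0x02, 0x06, 0x00, 0x50, 0x03, 0x07, 0x00,
  0x60, 0x04, 0x00, 0x20, 0x70, 0x05, 0x00, 0x30, 0x80, 0x06,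
  0x00, 0x40, 0x03, 0x07, 0x00, 0x50, 0x04, 0x08, 0x00, 0x60,
  0x04, 0x0a, 0x00, 0x60, 0x05, 0x00, 0x30, 0x80, 0x05, 0x00,
  0x40, 0x02, 0x07, 0x00, 0x50, 0x04, 0x09, 0x00, 0x60, 0x04,
  0x00, 0x20, 0x60, 0x05, 0x00, 0x30, 0xb0, 0x06, 0x00, 0x50,
  0x02, 0x07, 0x00, 0x50, 0x03]

-- Python's `2 ** e` for the nonnegative exponents these programs use
def pvPow2 (e : Int) : Int := (2 : Int) ^ e.toNat

-- lunar_leap_month; the table lookups are in range on every year these programs reach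
-- inside Pre_, so `pyGetD … 0` (default never used there) stands for Python's `[_]`.
def lunar_leap_month (year : Int) : Int :=
  let index := PySem.Int.floordiv (year - 1901) 2
  let pos := PySem.Int.mod (year - 1901 + 1) 2
  let a := PySem.List.pyGetD pvLeapTable index 0
  PySem.Int.mod (PySem.Int.floordiv a (pvPow2 (pos * 4))) (pvPow2 4)

-- lunar_months_day_count: the append-loop over range(1, cnt+1) as a map over pyRange
def lunar_months_day_count (year : Int) : List Int :=
  let raw := PySem.List.pyGetD pvTable (year - 1901) 0
  let cnt : Int := if lunar_leap_month year ≠ 0 then 13 else 12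
  (PySem.List.pyRange 1 (cnt + 1) 1).map (fun i =>
    let cur := PySem.Int.mod (PySem.Int.floordiv raw (pvPow2 (16 - i))) 2
    if cur = 0 then (29 : Int) else 30)

-- A's year while-loop: the remaining suffix of the year table serves as termination
-- measure; an exhausted list is Python's IndexError region (outside Pre_).
def pvYearLoopA : List Int → Int → Int → Int × Int
  | [], year, rest => (year, rest)
  | _ :: fuel, year, rest =>
    let days := (lunar_months_day_count year).sum
    if rest > days then pvYearLoopA fuel (year + 1) (rest - days) else (year, rest)

-- A's month while-loop: the successive `lunar_months_day[lunar_month - 1]` lookups walk the list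
def pvMonthLoopA : List Int → Int → Int → Int × Int
  | [], month, rest => (month, rest)
  | d :: ds, month, rest =>
    if rest > d then pvMonthLoopA ds (month + 1) (rest - d) else (month, rest)

def lunar_date (all_days : Int) : Int × Int × Int × Bool :=
  let rest_days := all_days - 49
  let yr := pvYearLoopA pvTable 1901 rest_days
  let lunar_year := yr.1
  let ms := lunar_months_day_count lunar_year
  let md := pvMonthLoopA ms 1 yr.2
  let lunar_month := md.1
  let lunar_day := md.2
  let this_year_leap_month := lunar_leap_month lunar_year
  if lunar_month > this_year_leap_month ∧ this_year_leap_month > 0 then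
    let m := lunar_month - 1
    (lunar_year, m, lunar_day, decide (m = this_year_leap_month))
  else
    (lunar_year, lunar_month, lunar_day, false)

-- ===== PORT B =====

-- _leap: `a >> s` and `a & 0xF` on these nonnegative ints are exactly `a // 2**s` and `a % 16`
def pvLeapB (year : Int) : Int :=
  let a := PySem.List.pyGetD pvLeapTable (PySem.Int.floordiv (year - 1901) 2) 0
  PySem.Int.mod
    (PySem.Int.floordiv a (pvPow2 (PySem.Int.mod (year - 1901 + 1) 2 * 4))) 16

-- _months: `(raw >> (16-i)) & 1` = `raw // 2**(16-i) % 2` (raw is nonnegative)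
def pvMonthsB (year : Int) : List Int :=
  let raw := PySem.List.pyGetD pvTable (year - 1901) 0
  let cnt : Int := if pvLeapB year ≠ 0 then 13 else 12
  (PySem.List.pyRange 1 (cnt + 1) 1).map (fun i =>
    29 + PySem.Int.mod (PySem.Int.floordiv raw (pvPow2 (16 - i))) 2)

-- _cums: running-total loop
def pvCums (xs : List Int) : List Int :=
  (xs.foldl (fun (p : List Int × Int) x => (p.1 ++ [p.2 + x], p.2 + x)) ([], 0)).1

-- _MLISTS and _YCUMS, precomputed once
def pvMlists : List (List Int) := (PySem.List.pyRange 1901 2051 1).map pvMonthsB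
def pvYcums : List Int := pvCums (pvMlists.map (fun ms => ms.sum))

def lunar_date_alt (all_days : Int) : Int × Int × Int × Bool :=
  let rest_days := all_days - 49
  let k := PySem.List.bisectLeft pvYcums rest_days
  let lunar_year : Int := 1901 + (k : Int)
  let rem := rest_days - (if k > 0 then pvYcums.getD (k - 1) 0 else 0)
  let ms := pvMlists.getD k []   -- `_MLISTS[k]` out of range is Python's IndexError (outside Pre_)
  let mcums := pvCums ms
  let m := PySem.List.bisectLeft mcums rem
  let lunar_month : Int := (m : Int) + 1
  let lunar_day := rem - (if m > 0 then mcums.getD (m - 1) 0 else 0)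
  let this_year_leap_month := pvLeapB lunar_year
  if lunar_month > this_year_leap_month ∧ this_year_leap_month > 0 then
    let m' := lunar_month - 1
    (lunar_year, m', lunar_day, decide (m' = this_year_leap_month))
  else
    (lunar_year, lunar_month, lunar_day, false)

-- ===== PRECONDITION & SPEC =====

-- Pre_ excludes exactly the inputs where A raises IndexError (the year table 1901–2050
-- runs out once all_days - 49 exceeds the total day count 54779 of the table).
def Pre_lunar_date (all_days : Int) : Prop := all_days ≤ 54828
instance (all_days : Int) : Decidable (Pre_lunar_date all_days) := by
  unfold Pre_lunar_date; infer_instance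

def pvWitness_lunar_date : Int := 20000

def Spec_lunar_date (all_days : Int) (out : Int × Int × Int × Bool) : Prop := out = lunar_date_alt all_days
instance (all_days : Int) (out : Int × Int × Int × Bool) : Decidable (Spec_lunar_date all_days out) := by unfold Spec_lunar_date; infer_instance

-- ===== CLAIM (what is proved, stated in full; the proofs are below) =====
def Claim_equal_lunar_date : Prop := ∀ (all_days : Int), Dom_lunar_date all_days → Pre_lunar_date all_days → Spec_lunar_date all_days (lunar_date all_days)

-- ===== LEMMAS AND PROOFS =====

theorem pvCums_go (xs : List Int) : ∀ (acc : List Int) (t : Int),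
    (xs.foldl (fun (p : List Int × Int) x => (p.1 ++ [p.2 + x], p.2 + x)) (acc, t)).1
      = acc ++ (pvCums xs).map (t + ·) := by
  induction xs with
  | nil => intro acc t; simp [pvCums]
  | cons x xs ih =>
    intro acc t
    have h1 : pvCums (x :: xs) = [x] ++ (pvCums xs).map (x + ·) := by
      show (List.foldl _ (([] : List Int) ++ [0 + x], 0 + x) xs).1 = _
      rw [ih]; simp
    simp only [List.foldl_cons, h1]
    rw [ih]
    simp [List.map_map, Function.comp_def, add_assoc]

theorem pvCums_cons (x : Int) (xs : List Int) :
    pvCums (x :: xs) = x :: (pvCums xs).map (x + ·) := by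
  show (List.foldl _ (([] : List Int) ++ [0 + x], 0 + x) xs).1 = _
  rw [pvCums_go]; simp

theorem pvCums_length (xs : List Int) : (pvCums xs).length = xs.length := by
  induction xs with
  | nil => simp [pvCums]
  | cons x xs ih => rw [pvCums_cons]; simp [ih]

theorem pvCums_mem_nonneg (xs : List Int) (h : ∀ a ∈ xs, 0 ≤ a) :
    ∀ c ∈ pvCums xs, 0 ≤ c := by
  induction xs with
  | nil => simp [pvCums]
  | cons x xs ih =>
    rw [pvCums_cons]
    intro c hc
    have hx : 0 ≤ x := h x (by simp)
    rcases List.mem_cons.mp hc with rfl | hm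
    · exact hx
    · obtain ⟨c', hc', rfl⟩ := List.mem_map.mp hm
      have := ih (fun a ha => h a (by simp [ha])) c' hc'
      omega

theorem pvCums_sorted (xs : List Int) (h : ∀ a ∈ xs, 0 ≤ a) :
    (pvCums xs).Pairwise (· ≤ ·) := by
  induction xs with
  | nil => simp [pvCums]
  | cons x xs ih =>
    rw [pvCums_cons]
    refine List.pairwise_cons.mpr ⟨?_, ?_⟩
    · intro b hb
      obtain ⟨c', hc', rfl⟩ := List.mem_map.mp hb
      have := pvCums_mem_nonneg xs (fun a ha => h a (by simp [ha])) c' hc'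
      omega
    · exact List.pairwise_map.mpr ((ih (fun a ha => h a (by simp [ha]))).imp (by intro a b hab; omega))

def pvTw (xs : List Int) (x : Int) : Nat := (xs.takeWhile (fun c => decide (c < x))).length

theorem pvTw_le (xs : List Int) (x : Int) : pvTw xs x ≤ xs.length :=
  (List.takeWhile_prefix _).length_le

theorem pvLoop_spec (ds : List Int) : ∀ (start rest : Int),
    pvMonthLoopA ds start rest =
      (start + (pvTw (pvCums ds) rest : Int),
       rest - (if pvTw (pvCums ds) rest > 0 then (pvCums ds).getD (pvTw (pvCums ds) rest - 1) 0 else 0)) := by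
  induction ds with
  | nil => intro start rest; simp [pvMonthLoopA, pvCums, pvTw]
  | cons d ds ih =>
    intro start rest
    rw [pvCums_cons]
    by_cases hc : d < rest
    · have hstep : pvMonthLoopA (d :: ds) start rest = pvMonthLoopA ds (start + 1) (rest - d) := by
        simp [pvMonthLoopA, hc]
      have hpred : ((fun c => decide (c < rest)) ∘ (fun c => d + c)) = (fun c => decide (c < rest - d)) := by
        funext c; simp; omega
      have htw : pvTw (d :: (pvCums ds).map (d + ·)) rest = 1 + pvTw (pvCums ds) (rest - d) := by
        simp only [pvTw, List.takeWhile_cons, decide_eq_true_eq, hc, if_pos, List.takeWhile_map,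
          hpred, List.length_cons, List.length_map]
        omega
      rw [hstep, ih, htw]
      set k := pvTw (pvCums ds) (rest - d) with hk
      have hkle : k ≤ (pvCums ds).length := pvTw_le _ _
      simp only [Prod.mk.injEq]
      refine ⟨by push_cast; ring, ?_⟩
      rcases Nat.eq_zero_or_pos k with hk0 | hkpos
      · simp [hk0]
      · have h1 : 1 + k > 0 := by omega
        have h2 : 1 + k - 1 = (k - 1) + 1 := by omega
        have hklt : k - 1 < (pvCums ds).length := by omega
        simp only [if_pos h1, if_pos hkpos, h2, List.getD_cons_succ]
        rw [List.getD_eq_getElem _ _ hklt,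
            List.getD_eq_getElem _ _ (show k - 1 < (List.map (fun x => d + x) (pvCums ds)).length by simpa using hklt),
            List.getElem_map]
        omega
    · have : ¬ rest > d := by omega
      simp [pvMonthLoopA, this, pvTw]

theorem pv_takeWhile_stop {α : Type} (p : α → Bool) (l : List α)
    (h : (l.takeWhile p).length < l.length) :
    ¬ (p (l[(l.takeWhile p).length]'h) = true) := by
  induction l with
  | nil => simp at h
  | cons a l ih =>
    by_cases hp : p a = true
    · simpa [List.takeWhile_cons, hp] using ih (by simpa [List.takeWhile_cons, hp] using h)
    · simp [hp]

theorem pvBisect_eq (xs : List Int) (x : Int) (h : xs.Pairwise (· ≤ ·)) :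
    PySem.List.bisectLeft xs x = pvTw xs x := by
  obtain ⟨hle, hlt, hge⟩ := PySem.List.bisectLeft_spec xs x h
  have hk'le : pvTw xs x ≤ xs.length := pvTw_le xs x
  rcases Nat.lt_trichotomy (PySem.List.bisectLeft xs x) (pvTw xs x) with hlt1 | heq | hgt1
  · exfalso
    have hb : PySem.List.bisectLeft xs x < xs.length := lt_of_lt_of_le hlt1 hk'le
    have h1 : xs[PySem.List.bisectLeft xs x] < x := by
      have hlen : PySem.List.bisectLeft xs x < (xs.takeWhile (fun c => decide (c < x))).length := hlt1
      have heq := (List.takeWhile_prefix (l := xs) (fun c => decide (c < x))).getElem hlen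
      have hmem := List.getElem_mem hlen
      rw [heq] at hmem
      simpa using List.mem_takeWhile_imp hmem
    have h2 : x ≤ xs[PySem.List.bisectLeft xs x] := hge _ hb le_rfl
    omega
  · exact heq
  · exfalso
    simp only [pvTw] at hgt1 ⊢
    have hb : (xs.takeWhile (fun c => decide (c < x))).length < xs.length := lt_of_lt_of_le hgt1 hle
    have h1 : xs[(xs.takeWhile (fun c => decide (c < x))).length] < x := hlt _ hb hgt1
    have h2 := pv_takeWhile_stop (fun c => decide (c < x)) xs hb
    simp at h2
    omega

theorem pvLeap_eq (y : Int) : pvLeapB y = lunar_leap_month y := rfl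

theorem pvMonths_eq (y : Int) : pvMonthsB y = lunar_months_day_count y := by
  unfold pvMonthsB lunar_months_day_count
  rw [pvLeap_eq]
  refine List.map_congr_left ?_
  intro i _
  rcases PySem.Int.mod_two_eq (PySem.Int.floordiv (PySem.List.pyGetD pvTable (y - 1901) 0) (pvPow2 (16 - i))) with h | h <;>
    · dsimp only
      rw [h]
      norm_num

theorem pvMonths_pos (y : Int) : ∀ d ∈ lunar_months_day_count y, 0 < d := by
  unfold lunar_months_day_count
  intro d hd
  obtain ⟨i, _, rfl⟩ := List.mem_map.mp hd
  dsimp only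
  split <;> omega

def pvYearTotals : List Int := (List.range 150).map (fun i : Nat => (lunar_months_day_count (1901 + (i : Int))).sum)

theorem pvRange_eq : PySem.List.pyRange 1901 2051 1 = (List.range 150).map (fun i : Nat => 1901 + (i : Int)) := by decide

theorem pvMlists_eq : pvMlists = (List.range 150).map (fun i : Nat => lunar_months_day_count (1901 + (i : Int))) := by
  unfold pvMlists
  rw [pvRange_eq, List.map_map]
  exact List.map_congr_left (fun a _ => pvMonths_eq _)

theorem pvYT_eq : pvMlists.map (fun ms => ms.sum) = pvYearTotals := by
  rw [pvMlists_eq, List.map_map]; rfl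

theorem pvMlists_getD (k : Nat) (hk : k < 150) :
    pvMlists.getD k [] = lunar_months_day_count (1901 + (k : Int)) := by
  rw [pvMlists_eq, PySem.List.getD_map_range _ _ _ _ hk]

theorem pvTable_len : pvTable.length = 150 := by rfl

theorem pvYearTotals_len : pvYearTotals.length = 150 := by simp [pvYearTotals]

theorem pvBridge : ∀ (n i : Nat), i + n = 150 → ∀ rest : Int,
    pvYearLoopA (pvTable.drop i) (1901 + (i : Int)) rest
      = pvMonthLoopA (pvYearTotals.drop i) (1901 + (i : Int)) rest := by
  intro n
  induction n with
  | zero =>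
    intro i hi rest
    have h1 : pvTable.drop i = [] := List.drop_eq_nil_of_le (by rw [pvTable_len]; omega)
    have h2 : pvYearTotals.drop i = [] := List.drop_eq_nil_of_le (by rw [pvYearTotals_len]; omega)
    rw [h1, h2]; rfl
  | succ n ih =>
    intro i hi rest
    have hi150 : i < 150 := by omega
    have hT : i < pvTable.length := by rw [pvTable_len]; exact hi150
    have hY : i < pvYearTotals.length := by rw [pvYearTotals_len]; exact hi150
    have e1 := List.drop_eq_getElem_cons hT
    have e2 := List.drop_eq_getElem_cons hY
    rw [e1, e2]
    have hyt : pvYearTotals[i]'hY = (lunar_months_day_count (1901 + (i : Int))).sum := by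
      unfold pvYearTotals
      rw [List.getElem_map, List.getElem_range]
    simp only [pvYearLoopA, pvMonthLoopA, hyt]
    by_cases hc : rest > (lunar_months_day_count (1901 + (i : Int))).sum
    · rw [if_pos hc, if_pos hc]
      have hcast : (1901 : Int) + (i : Int) + 1 = 1901 + ((i + 1 : Nat) : Int) := by push_cast; ring
      rw [hcast]
      exact ih (i + 1) (by omega) _
    · rw [if_neg hc, if_neg hc]


-- ===== VERDICT (by name: the statement is the Claim_ definition above) =====
set_option maxRecDepth 1000000 in
theorem lunar_date_spec : Claim_equal_lunar_date := by
  unfold Claim_equal_lunar_date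
  intro all_days _ hpre
  unfold Pre_lunar_date at hpre
  unfold Spec_lunar_date
  have hrest : all_days - 49 ≤ 54779 := by omega
  -- year level
  have hposY : ∀ a ∈ pvYearTotals, (0:Int) ≤ a := by
    intro a ha
    obtain ⟨i, _, rfl⟩ := List.mem_map.mp ha
    exact List.sum_nonneg (fun d hd => le_of_lt (pvMonths_pos _ d hd))
  have hsortY : (pvCums pvYearTotals).Pairwise (· ≤ ·) := pvCums_sorted _ hposY
  have hYc : pvYcums = pvCums pvYearTotals := by unfold pvYcums; rw [pvYT_eq]
  have hbisY : PySem.List.bisectLeft pvYcums (all_days - 49) = pvTw (pvCums pvYearTotals) (all_days - 49) := by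
    rw [hYc]; exact pvBisect_eq _ _ hsortY
  set kY := pvTw (pvCums pvYearTotals) (all_days - 49) with hkYdef
  have hYlen : (pvCums pvYearTotals).length = 150 := by
    rw [pvCums_length, pvYearTotals_len]
  have hy : pvYearLoopA pvTable 1901 (all_days - 49)
      = (1901 + (kY : Int), (all_days - 49) - (if kY > 0 then (pvCums pvYearTotals).getD (kY - 1) 0 else 0)) := by
    have hb := pvBridge 150 0 rfl (all_days - 49)
    simp only [List.drop_zero, Nat.cast_zero, add_zero] at hb
    rw [hb, pvLoop_spec]
  have hkY149 : kY < 150 := by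
    rcases Nat.lt_or_ge kY 150 with h | h
    · exact h
    · exfalso
      have hle : kY ≤ 150 := by
        have := pvTw_le (pvCums pvYearTotals) (all_days - 49)
        omega
      have hk150 : kY = 150 := by omega
      have hfull : (pvCums pvYearTotals).takeWhile (fun c => decide (c < all_days - 49))
          = pvCums pvYearTotals := by
        refine (List.takeWhile_prefix _).eq_of_length ?_
        rw [hYlen]
        exact hk150 ▸ hkYdef ▸ rfl
      have hmem : (54779 : Int) ∈ pvCums pvYearTotals := by
        rw [← hYc]; decide
      rw [← hfull] at hmem
      have := List.mem_takeWhile_imp hmem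
      simp at this
      omega
  -- month level
  have hms : pvMlists.getD kY [] = lunar_months_day_count (1901 + (kY : Int)) := pvMlists_getD kY hkY149
  have hsortM : (pvCums (lunar_months_day_count (1901 + (kY : Int)))).Pairwise (· ≤ ·) :=
    pvCums_sorted _ (fun a ha => le_of_lt (pvMonths_pos _ a ha))
  set rem := (all_days - 49) - (if kY > 0 then (pvCums pvYearTotals).getD (kY - 1) 0 else 0) with hremdef
  have hbisM : PySem.List.bisectLeft (pvCums (lunar_months_day_count (1901 + (kY : Int)))) rem
      = pvTw (pvCums (lunar_months_day_count (1901 + (kY : Int)))) rem := pvBisect_eq _ _ hsortM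
  set kM := pvTw (pvCums (lunar_months_day_count (1901 + (kY : Int)))) rem with hkMdef
  have hm : pvMonthLoopA (lunar_months_day_count (1901 + (kY : Int))) 1 rem
      = (1 + (kM : Int), rem - (if kM > 0 then (pvCums (lunar_months_day_count (1901 + (kY : Int)))).getD (kM - 1) 0 else 0)) :=
    pvLoop_spec _ 1 rem
  have hbisY' : PySem.List.bisectLeft (pvCums pvYearTotals) (all_days - 49) = kY := by
    rw [← hYc]; exact hbisY
  -- assemble
  show lunar_date all_days = lunar_date_alt all_days
  unfold lunar_date lunar_date_alt
  simp only [hYc, hy, hbisY', hms, ← hremdef, hbisM, hm, pvLeap_eq]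
  have hcomm : (1 : Int) + (kM : Int) = (kM : Int) + 1 := by ring
  rw [hcomm]
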